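-- pv_equiv track=rewrite | github.com/aaronstanek-bucket/stegosaurus | stegosaurus.py | isDataMember
-- ===== SOURCE A (Python) =====
-- def isDataMember(s):
--     if len(s)<2:
--         return False
--     t = 0
--     for x in s:
--         if t==0:
--             if (x[1]=="class") or (x[1]=="struct"):
--                 t = 1
--         else:
--             if x[1]=="func":
--                 return False
--     if t==0:
--         return False
--     return True
-- ===== SOURCE B (Python) =====
-- def isDataMember(s):
--     if len(s) < 2:
--         return False
--     classes = [i for i, x in enumerate(s) if x[1] in ("class", "struct")]
--     funcs = [i for i, x in enumerate(s) if x[1] == "func"]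
--     return bool(classes) and all(j <= classes[0] for j in funcs)
-- ===== Notes on version B (the rewrite author's own statement) =====
-- stated objective: alternative
-- what changed: Replaces A's single stateful flag loop by an index-arithmetic formulation: build the lists of class/struct indices and func indices with comprehensions and return whether a class/struct exists and every func index is at most the first class/struct index.
import Mathlib
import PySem

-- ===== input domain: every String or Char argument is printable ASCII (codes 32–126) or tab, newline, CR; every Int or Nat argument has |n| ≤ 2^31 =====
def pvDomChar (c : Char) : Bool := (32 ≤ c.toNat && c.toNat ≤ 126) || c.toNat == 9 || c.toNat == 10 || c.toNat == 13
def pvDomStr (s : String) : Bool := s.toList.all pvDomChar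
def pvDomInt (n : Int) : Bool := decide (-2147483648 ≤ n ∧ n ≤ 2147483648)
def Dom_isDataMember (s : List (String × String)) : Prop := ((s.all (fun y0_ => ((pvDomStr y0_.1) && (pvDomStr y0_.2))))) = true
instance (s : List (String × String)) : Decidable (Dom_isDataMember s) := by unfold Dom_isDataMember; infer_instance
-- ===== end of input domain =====

-- B replaces A's stateful flag loop by an index-arithmetic formulation over enumerated index lists (objective: alternative).

-- ===== PORT A =====
-- loop over s with flag t; none = early `return False` inside the loop
def isDataMemberLoop : List (String × String) → Nat → Option Nat
  | [], t => some t
  | x :: rest, t =>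
    if t == 0 then
      isDataMemberLoop rest (if x.2 == "class" || x.2 == "struct" then 1 else 0)
    else
      if x.2 == "func" then none else isDataMemberLoop rest t

def isDataMember (s : List (String × String)) : Bool :=
  if s.length < 2 then false
  else
    match isDataMemberLoop s 0 with
    | none => false
    | some t => if t == 0 then false else true

-- ===== PORT B =====
-- the two index comprehensions over enumerate(s), then `bool(classes) and all(j <= classes[0] for j in funcs)`
def isDataMember_alt (s : List (String × String)) : Bool :=
  if s.length < 2 then false
  else
    let classes := (PySem.List.enumerate s).filterMap
      (fun p => if p.2.2 == "class" || p.2.2 == "struct" then some p.1 else none)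
    let funcs := (PySem.List.enumerate s).filterMap
      (fun p => if p.2.2 == "func" then some p.1 else none)
    match classes.head? with
    | none => false
    | some c0 => funcs.all (fun j => decide (j ≤ c0))

-- ===== PRECONDITION & SPEC =====
def Spec_isDataMember (s : List (String × String)) (out : Bool) : Prop := out = isDataMember_alt s
instance (s : List (String × String)) (out : Bool) : Decidable (Spec_isDataMember s out) := by unfold Spec_isDataMember; infer_instance

-- ===== CLAIM (what is proved, stated in full; the proofs are below) =====
def Claim_equal_isDataMember : Prop := ∀ (s : List (String × String)), Dom_isDataMember s → Spec_isDataMember s (isDataMember s)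

-- ===== LEMMAS AND PROOFS =====

-- proof-side helper: the remainder of s after its first class/struct entry, if any
def pvFindRest : List (String × String) → Option (List (String × String))
  | [] => none
  | x :: rest => if x.2 == "class" || x.2 == "struct" then some rest else pvFindRest rest

-- A's loop from state 1 fails iff some remaining tag is "func"
theorem loop_one (s : List (String × String)) :
    isDataMemberLoop s 1 = if s.any (fun y => y.2 == "func") then none else some 1 := by
  induction s with
  | nil => simp [isDataMemberLoop]
  | cons x rest ih =>
    by_cases h : x.2 = "func"
    · simp [isDataMemberLoop, h]
    · have h' : (x.2 == "func") = false := beq_eq_false_iff_ne.mpr h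
      simp only [isDataMemberLoop, h', List.any_cons, Bool.false_or, ih]
      simp

-- A's loop from state 0 = find the first class/struct, then run from state 1
theorem loop_zero (s : List (String × String)) :
    isDataMemberLoop s 0 =
      match pvFindRest s with
      | none => some 0
      | some rest => isDataMemberLoop rest 1 := by
  induction s with
  | nil => simp [isDataMemberLoop, pvFindRest]
  | cons x rest ih =>
    simp only [isDataMemberLoop, pvFindRest]
    by_cases h : x.2 == "class" || x.2 == "struct" <;> simp [h, ih]

-- every index produced by an index comprehension over enumerate-from-n is at least n
theorem mem_idx_ge (q : String × String → Bool) (s : List (String × String)) (n j : Int)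
    (hj : j ∈ (PySem.List.enumerate s n).filterMap (fun p => if q p.2 then some p.1 else none)) :
    n ≤ j := by
  rcases List.mem_filterMap.mp hj with ⟨p, hp, hq⟩
  rcases (PySem.List.mem_enumerate_iff _ _ _).mp hp with ⟨k, hk, rfl⟩
  split at hq
  · simp at hq; omega
  · simp at hq

-- the func-index comprehension is empty iff no tag is "func"
theorem funcs_empty_iff (s : List (String × String)) (n : Int) :
    (PySem.List.enumerate s n).filterMap (fun p => if p.2.2 == "func" then some p.1 else none) = []
      ↔ s.any (fun y => y.2 == "func") = false := by
  induction s generalizing n with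
  | nil => simp [PySem.List.enumerate_nil]
  | cons x rest ih =>
    rw [PySem.List.enumerate_cons]
    by_cases h : (x.2 == "func") = true
    · rw [List.filterMap_cons_some (b := n) (by simp [h])]
      simp [h]
    · have h' : (x.2 == "func") = false := by simp_all
      rw [List.filterMap_cons_none (by simp [h']), List.any_cons, h', Bool.false_or]
      exact ih (n + 1)

-- core: B's index comparison equals the find-then-scan form of A's loop
theorem alt_core (s : List (String × String)) (n : Int) :
    (match ((PySem.List.enumerate s n).filterMap
              (fun p => if p.2.2 == "class" || p.2.2 == "struct" then some p.1 else none)).head? with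
     | none => false
     | some c0 => ((PySem.List.enumerate s n).filterMap
              (fun p => if p.2.2 == "func" then some p.1 else none)).all (fun j => decide (j ≤ c0)))
    = (match pvFindRest s with
       | none => false
       | some rest => !(rest.any (fun y => y.2 == "func"))) := by
  induction s generalizing n with
  | nil => simp [PySem.List.enumerate_nil, pvFindRest]
  | cons x rest ih =>
    rw [PySem.List.enumerate_cons]
    by_cases hc : (x.2 == "class" || x.2 == "struct") = true
    · have hxf : (x.2 == "func") = false := by
        rcases (Bool.or_eq_true _ _).mp hc with h | h
        · have := eq_of_beq h; simp [this]
        · have := eq_of_beq h; simp [this]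
      rw [List.filterMap_cons_some (b := n) (by simp [hc]),
          List.filterMap_cons_none (by simp [hxf])]
      simp only [pvFindRest, hc, if_true, List.head?_cons]
      cases hf : rest.any (fun y => y.2 == "func") with
      | false =>
        rw [(funcs_empty_iff rest (n + 1)).mpr hf]
        simp
      | true =>
        have hne : ((PySem.List.enumerate rest (n + 1)).filterMap
            (fun p => if p.2.2 == "func" then some p.1 else none)) ≠ [] := by
          intro h; rw [funcs_empty_iff] at h; simp [h] at hf
        rcases List.exists_mem_of_ne_nil _ hne with ⟨j, hj⟩
        have hjge : n + 1 ≤ j := mem_idx_ge (fun y => y.2 == "func") rest (n + 1) j hj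
        have : ((PySem.List.enumerate rest (n + 1)).filterMap
            (fun p => if p.2.2 == "func" then some p.1 else none)).all
              (fun j => decide (j ≤ n)) = false := by
          refine List.all_eq_false.mpr ⟨j, hj, ?_⟩
          simp; omega
        exact this
    · rw [List.filterMap_cons_none (by simp [hc])]
      simp only [pvFindRest, hc, Bool.false_eq_true, if_false]
      by_cases hxf : (x.2 == "func") = true
      · rw [List.filterMap_cons_some (b := n) (by simp [hxf])]
        rw [← ih (n + 1)]
        cases hhd : ((PySem.List.enumerate rest (n + 1)).filterMap
            (fun p => if p.2.2 == "class" || p.2.2 == "struct" then some p.1 else none)).head? with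
        | none => simp
        | some c0 =>
          have hc0 : n + 1 ≤ c0 :=
            mem_idx_ge (fun y => y.2 == "class" || y.2 == "struct") rest (n + 1) c0
              (List.mem_of_mem_head? (by rw [hhd]; exact rfl))
          simp only [List.all_cons]
          have hdec : (decide (n ≤ c0)) = true := decide_eq_true (by omega)
          simp [hdec]
      · rw [List.filterMap_cons_none (by simp [hxf])]
        exact ih (n + 1)

-- ===== VERDICT (by name: the statement is the Claim_ definition above) =====
theorem isDataMember_spec : Claim_equal_isDataMember := by
  intro s _
  unfold Spec_isDataMember isDataMember isDataMember_alt
  by_cases hlen : s.length < 2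
  · simp [hlen]
  · simp only [hlen, if_false, loop_zero, alt_core s 0]
    cases h : pvFindRest s with
    | none => simp
    | some rest =>
      simp only [loop_one]
      by_cases hf : rest.any (fun y => y.2 == "func") = true <;> simp [hf]
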